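-- pv_equiv track=rewrite | github.com/mariosstm/Algorithms-Data-Structures | Παραδοτέο(4)_Algorithms&Data_Structures_/ask2.py | calc_ATA
-- ===== SOURCE A (Python) =====
-- def calc_ATA(a_jloc,a_irow):
--     c=0
--     b_jloc,b_iloc,b_jval,at=[],[0],[],[]
--     a_jloc.append(0)
--     for i in range (len(a_jloc)-1):
--         at=a_irow [a_jloc[i]:a_jloc[i+1]]
--
--
--         for k in range(i,
--             len(a_jloc)-1):
--             for q in at:
--                 if a_irow[a_jloc[k]:a_jloc[k+1]].count(q)!=0:
--                     c+=1
--
--             if c!=0: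
--                 b_jloc.append(k)
--                 b_jval.append(c)
--                 c=0
--         b_iloc.append(len(b_jloc))
--     b_iloc.pop()
--
--     return b_iloc,b_jloc,b_jval
-- ===== SOURCE B (Python) =====
-- def calc_ATA(a_jloc, a_irow):
--     a_jloc.append(0)
--     C = len(a_jloc) - 1
--     # transpose: row value -> {column: multiplicity}, one pass over the nonzeros
--     byval = {}
--     for i in range(C):
--         for q in a_irow[a_jloc[i]:a_jloc[i + 1]]:
--             cols = byval.get(q, {})
--             cols[i] = cols.get(i, 0) + 1
--             byval[q] = cols
--     # scatter: each row value q adds mult_i(q) to M[(i, k)] for every pair i <= k of its columns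
--     M = {}
--     for cols in byval.values():
--         for i, mi in cols.items():
--             for k in cols:
--                 if i <= k:
--                     M[(i, k)] = M.get((i, k), 0) + mi
--     # emit the CSC pointers directly
--     b_iloc, b_jloc, b_jval = [], [], []
--     for i in range(C):
--         b_iloc.append(len(b_jloc))
--         for k in range(i, C):
--             v = M.get((i, k), 0)
--             if v:
--                 b_jloc.append(k)
--                 b_jval.append(v)
--     return b_iloc, b_jloc, b_jval
-- ===== Notes on version B (the rewrite author's own statement) =====
-- stated objective: faster
-- what changed: A scans every pair of columns and rescans both slices for each element with list.count; B instead transposes the matrix once into per-value column-multiplicity maps, scatters each value's contribution mult_i(q) into a dict keyed by the column pair (i,k), and then emits the pointers by pure dict lookups, so no pair of columns is ever compared element by element.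
import Mathlib
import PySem

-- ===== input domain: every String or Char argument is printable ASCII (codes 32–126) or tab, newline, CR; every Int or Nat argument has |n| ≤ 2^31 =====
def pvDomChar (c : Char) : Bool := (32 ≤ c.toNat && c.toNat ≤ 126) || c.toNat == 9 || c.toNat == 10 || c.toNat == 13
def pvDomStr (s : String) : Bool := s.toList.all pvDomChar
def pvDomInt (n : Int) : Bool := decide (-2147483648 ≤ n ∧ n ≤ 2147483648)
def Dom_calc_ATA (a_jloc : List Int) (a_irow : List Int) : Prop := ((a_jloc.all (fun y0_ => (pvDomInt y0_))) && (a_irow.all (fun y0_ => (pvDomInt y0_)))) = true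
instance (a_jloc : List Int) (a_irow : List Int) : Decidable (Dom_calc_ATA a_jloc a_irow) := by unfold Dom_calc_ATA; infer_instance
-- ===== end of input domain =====

-- B replaces A's pairwise column comparison (which rescans both column slices with list.count
-- for every element of every pair) by a transpose/scatter/emit scheme: one pass groups the
-- nonzeros by row value into column-multiplicity maps, each value scatters its contribution
-- into a dict keyed by the column pair, and the output is emitted by dict lookups only.
-- Equivalence is about the RETURN value; both A and B mutate a_jloc by appending a trailing 0
-- (ported as a_jloc ++ [0]).

-- ===== PORT A =====
def calc_ATA (a_jloc : List Int) (a_irow : List Int) : List Int × List Int × List Int :=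
  -- c=0; b_jloc,b_iloc,b_jval = [],[0],[];  a_jloc.append(0)
  let jl := a_jloc ++ [(0 : Int)]
  let n : Int := (jl.length : Int) - 1
  -- state: (c, b_jloc, b_iloc, b_jval)
  let st :=
    (PySem.List.pyRange 0 n).foldl (fun (st : Int × List Int × List Int × List Int) i =>
      -- at = a_irow[a_jloc[i]:a_jloc[i+1]]
      let at_ := PySem.List.slice a_irow (some (PySem.List.pyGetD jl i 0)) (some (PySem.List.pyGetD jl (i + 1) 0))
      let st2 :=
        (PySem.List.pyRange i n).foldl (fun (st : Int × List Int × List Int) k =>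
          -- for q in at: if a_irow[a_jloc[k]:a_jloc[k+1]].count(q) != 0: c += 1
          let colk := PySem.List.slice a_irow (some (PySem.List.pyGetD jl k 0)) (some (PySem.List.pyGetD jl (k + 1) 0))
          let c := at_.foldl (fun c q => if colk.count q ≠ 0 then c + 1 else c) st.1
          -- if c != 0: b_jloc.append(k); b_jval.append(c); c = 0
          if c ≠ 0 then (0, st.2.1 ++ [k], st.2.2 ++ [c]) else (c, st.2.1, st.2.2))
          (st.1, st.2.1, st.2.2.2)
      -- b_iloc.append(len(b_jloc))
      (st2.1, st2.2.1, st.2.2.1 ++ [((st2.2.1).length : Int)], st2.2.2))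
      ((0 : Int), ([] : List Int), [(0 : Int)], ([] : List Int))
  -- b_iloc.pop(): b_iloc starts as [0] and only grows, so pop() always succeeds;
  -- its effect on the list is dropLast (the popped value is discarded by A).
  (st.2.2.1.dropLast, st.2.1, st.2.2.2)

-- ===== PORT B =====
def calc_ATA_alt (a_jloc : List Int) (a_irow : List Int) : List Int × List Int × List Int :=
  -- a_jloc.append(0); C = len(a_jloc) - 1
  let jl := a_jloc ++ [(0 : Int)]
  let C : Int := (jl.length : Int) - 1
  -- transpose: byval = {}; for i in range(C): for q in a_irow[a_jloc[i]:a_jloc[i+1]]: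
  --   cols = byval.get(q, {}); cols[i] = cols.get(i, 0) + 1; byval[q] = cols
  let byval :=
    (PySem.List.pyRange 0 C).foldl (fun bv i =>
      (PySem.List.slice a_irow (some (PySem.List.pyGetD jl i 0)) (some (PySem.List.pyGetD jl (i + 1) 0))).foldl
        (fun bv q => bv.modify q PySem.Dict.empty (fun cols => cols.insert i (cols.getD i 0 + 1))) bv)
      (PySem.Dict.empty : PySem.Dict Int (PySem.Dict Int Int))
  -- scatter: M = {}; for cols in byval.values(): for i, mi in cols.items():
  --   for k in cols: if i <= k: M[(i,k)] = M.get((i,k), 0) + mi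
  let M :=
    byval.values.foldl (fun M cols =>
      cols.items.foldl (fun M im =>
        cols.keys.foldl (fun M k =>
          if im.1 ≤ k then M.insert (im.1, k) (M.getD (im.1, k) 0 + im.2) else M) M) M)
      (PySem.Dict.empty : PySem.Dict (Int × Int) Int)
  -- emit: for i in range(C): b_iloc.append(len(b_jloc));
  --   for k in range(i, C): v = M.get((i,k), 0); if v: append k, v
  let st :=
    (PySem.List.pyRange 0 C).foldl (fun (st : List Int × List Int × List Int) i =>
      let b_iloc := st.1 ++ [((st.2.1).length : Int)]
      let st2 :=
        (PySem.List.pyRange i C).foldl (fun (st : List Int × List Int) k =>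
          let v := M.getD (i, k) 0
          if v ≠ 0 then (st.1 ++ [k], st.2 ++ [v]) else st)
          (st.2.1, st.2.2)
      (b_iloc, st2.1, st2.2))
      (([], [], []) : List Int × List Int × List Int)
  st

-- ===== PRECONDITION & SPEC =====
def Spec_calc_ATA (a_jloc : List Int) (a_irow : List Int) (out : List Int × List Int × List Int) : Prop := out = calc_ATA_alt a_jloc a_irow
instance (a_jloc : List Int) (a_irow : List Int) (out : List Int × List Int × List Int) : Decidable (Spec_calc_ATA a_jloc a_irow out) := by unfold Spec_calc_ATA; infer_instance

-- ===== CLAIM (what is proved, stated in full; the proofs are below) =====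
def Claim_equal_calc_ATA : Prop := ∀ (a_jloc : List Int) (a_irow : List Int), Dom_calc_ATA a_jloc a_irow → Spec_calc_ATA a_jloc a_irow (calc_ATA a_jloc a_irow)

-- ===== LEMMAS AND PROOFS =====

-- column i of the (mutated) CSC input, and the per-pair count A computes
def pvCol (jl rows : List Int) (i : Int) : List Int :=
  PySem.List.slice rows (some (PySem.List.pyGetD jl i 0)) (some (PySem.List.pyGetD jl (i + 1) 0))

def pvCnt (jl rows : List Int) (i k : Int) : Int :=
  ((pvCol jl rows i).countP (fun q => decide (q ∈ pvCol jl rows k)) : Int)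

-- the (k, value) pairs emitted for row i, and the assembled outputs
def pvFm1 (g : Int → Int → Int) (n i : Int) : List Int :=
  (PySem.List.pyRange i n).filterMap (fun k => if g i k ≠ 0 then some k else none)

def pvFm2 (g : Int → Int → Int) (n i : Int) : List Int :=
  (PySem.List.pyRange i n).filterMap (fun k => if g i k ≠ 0 then some (g i k) else none)

def pvJL (g : Int → Int → Int) (n M : Int) : List Int :=
  (PySem.List.pyRange 0 M).flatMap (pvFm1 g n)

def pvJV (g : Int → Int → Int) (n M : Int) : List Int :=
  (PySem.List.pyRange 0 M).flatMap (pvFm2 g n)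

def pvIL (g : Int → Int → Int) (n M : Int) : List Int :=
  (PySem.List.pyRange 0 M).map (fun i => ((pvJL g n i).length : Int))

-- B's transpose loop as a fold over the stream of (column, value) occurrences
def pvTStep (d : PySem.Dict Int (PySem.Dict Int Int)) (p : Int × Int) : PySem.Dict Int (PySem.Dict Int Int) :=
  d.modify p.2 PySem.Dict.empty (fun cols => cols.insert p.1 (cols.getD p.1 0 + 1))

def pvStream (jl rows : List Int) (C : Int) : List (Int × Int) :=
  (PySem.List.pyRange 0 C).flatMap (fun i => (pvCol jl rows i).map (fun q => (i, q)))

def pvBy (jl rows : List Int) (C : Int) : PySem.Dict Int (PySem.Dict Int Int) :=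
  (pvStream jl rows C).foldl pvTStep PySem.Dict.empty

def pvM (jl rows : List Int) (C : Int) : PySem.Dict (Int × Int) Int :=
  (pvBy jl rows C).values.foldl (fun M cols =>
    cols.items.foldl (fun M im =>
      cols.keys.foldl (fun M k =>
        if im.1 ≤ k then M.insert (im.1, k) (M.getD (im.1, k) 0 + im.2) else M) M) M)
    (PySem.Dict.empty : PySem.Dict (Int × Int) Int)

-- A's q-loop counts the occurrences of column i whose value occurs in column k
lemma pv_countfold (colk at_ : List Int) (c0 : Int) :
    at_.foldl (fun c q => if colk.count q ≠ 0 then c + 1 else c) c0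
      = c0 + ((at_.countP (fun q => decide (q ∈ colk))) : Int) := by
  induction at_ generalizing c0 with
  | nil => simp
  | cons q t ih =>
    simp only [List.foldl_cons, List.countP_cons, ih]
    by_cases h : q ∈ colk
    · have hc : colk.count q ≠ 0 := by
        simpa [List.count_eq_zero] using h
      simp [hc, h]; ring
    · have hc : colk.count q = 0 := List.count_eq_zero.mpr h
      simp [hc, h]

-- the emission loop appends exactly the nonzero pairs
lemma pv_emitfold (g : Int → Int) (l : List Int) :
    ∀ (L1 L2 : List Int),
      l.foldl (fun (st : List Int × List Int) k =>
          if g k ≠ 0 then (st.1 ++ [k], st.2 ++ [g k]) else st) (L1, L2)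
        = (L1 ++ l.filterMap (fun k => if g k ≠ 0 then some k else none),
           L2 ++ l.filterMap (fun k => if g k ≠ 0 then some (g k) else none)) := by
  induction l with
  | nil => simp
  | cons k t ih =>
    intro L1 L2
    by_cases h : g k ≠ 0
    · simp only [List.foldl_cons, if_pos h, ih, List.filterMap_cons, h]
      simp
    · simp only [List.foldl_cons, if_neg h, ih, List.filterMap_cons, h]
      simp

lemma pv_discard_of_not_mem (s : List Int) (x : Int) (h : x ∉ s) :
    PySem.Set.discard s x = s := by
  simp only [PySem.Set.discard]
  apply List.filter_eq_self.mpr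
  intro a ha
  simp only [Bool.not_eq_eq_eq_not, Bool.not_true, beq_eq_false_iff_ne, ne_eq]
  exact fun he => h (he ▸ ha)

lemma pv_discard_cons_self (x : Int) (t : List Int) (hnt : x ∉ t) :
    PySem.Set.discard (x :: t) x = t := by
  simp only [PySem.Set.discard, List.filter_cons]
  simp only [beq_self_eq_true, Bool.not_true, Bool.false_eq_true, if_false]
  apply List.filter_eq_self.mpr
  intro a ha
  simp only [Bool.not_eq_eq_eq_not, Bool.not_true, beq_eq_false_iff_ne, ne_eq]
  exact fun he => hnt (he ▸ ha)

lemma pv_discard_cons_ne (x y : Int) (t : List Int) (hyx : y ≠ x) :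
    PySem.Set.discard (y :: t) x = y :: PySem.Set.discard t x := by
  simp only [PySem.Set.discard, List.filter_cons]
  simp [hyx]

lemma pv_sum_discard (G : Int → Int) :
    ∀ (s : List Int), s.Nodup → ∀ x ∈ s,
      ((s.map G).sum : Int) = G x + (((PySem.Set.discard s x).map G).sum : Int) := by
  intro s
  induction s with
  | nil => intro _ x hx; simp at hx
  | cons y t ih =>
    intro hs x hx
    rcases List.mem_cons.mp hx with rfl | hxt
    · rw [pv_discard_cons_self x t (List.nodup_cons.mp hs).1]
      simp
    · have hyx : y ≠ x := fun h => (List.nodup_cons.mp hs).1 (h ▸ hxt)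
      rw [pv_discard_cons_ne x y t hyx]
      have hrec := ih (List.nodup_cons.mp hs).2 x hxt
      simp only [List.map_cons, List.sum_cons, hrec]
      ring

-- A's inner loop with its carried-and-reset counter c (invariant: c = 0)
lemma pv_Ainner (g : Int → Int) (l : List Int) :
    ∀ (L1 L2 : List Int),
      l.foldl (fun (st : Int × List Int × List Int) k =>
          let c := st.1 + g k
          if c ≠ 0 then ((0 : Int), st.2.1 ++ [k], st.2.2 ++ [c]) else (c, st.2.1, st.2.2)) (0, L1, L2)
        = (0, L1 ++ l.filterMap (fun k => if g k ≠ 0 then some k else none),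
              L2 ++ l.filterMap (fun k => if g k ≠ 0 then some (g k) else none)) := by
  induction l with
  | nil => simp
  | cons k t ih =>
    intro L1 L2
    by_cases h : g k ≠ 0
    · simp only [List.foldl_cons, zero_add, if_pos h, ih, List.filterMap_cons, h]
      simp
    · push_neg at h
      simp only [List.foldl_cons, zero_add, h, List.filterMap_cons]
      simpa [h] using ih L1 L2

-- grouping: a multiplicity-weighted sum over the distinct values IS the countP over the list
lemma pv_sumDedup (p : Int → Bool) (xs : List Int) :
    (((PySem.Set.ofList xs).map (fun q => if p q then (xs.count q : Int) else 0)).sum : Int)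
      = (xs.countP p : Int) := by
  induction xs with
  | nil => simp [PySem.Set.ofList_nil]
  | cons x t ih =>
    rw [PySem.Set.ofList_cons]
    have hmapeq : ((PySem.Set.ofList t).discard x).map
          (fun q => if p q then ((x :: t).count q : Int) else 0)
        = ((PySem.Set.ofList t).discard x).map (fun q => if p q then (t.count q : Int) else 0) := by
      apply List.map_congr_left
      intro q hq
      have hqx : q ≠ x := ((PySem.Set.mem_discard _ _ _).mp hq).2
      have : (x :: t).count q = t.count q := by
        simp [List.count_cons, Ne.symm hqx]
      rw [this]
    by_cases hx : x ∈ t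
    · have hsplit := pv_sum_discard (fun q => if p q then (t.count q : Int) else 0)
        (PySem.Set.ofList t) (PySem.Set.nodup_ofList t)
        x ((PySem.Set.mem_ofList t x).mpr hx)
      have hcx : (x :: t).count x = t.count x + 1 := by simp
      rw [List.map_cons, List.sum_cons, hmapeq, hcx, List.countP_cons]
      rw [ih] at hsplit
      by_cases hp : p x <;> simp [hp] at hsplit ⊢ <;> omega
    · have hdx : (PySem.Set.ofList t).discard x = PySem.Set.ofList t :=
        pv_discard_of_not_mem _ _ (fun h => hx ((PySem.Set.mem_ofList t x).mp h))
      have hc0 : t.count x = 0 := List.count_eq_zero.mpr hx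
      have hcx : (x :: t).count x = 1 := by simp [hc0]
      rw [List.map_cons, List.sum_cons, hmapeq, hdx, hcx, List.countP_cons, ih]
      by_cases hp : p x <;> simp [hp] <;> omega

lemma pv_JL_succ (g : Int → Int → Int) (n M : Int) (hM : 0 ≤ M) :
    pvJL g n (M + 1) = pvJL g n M ++ pvFm1 g n M := by
  unfold pvJL
  rw [PySem.List.pyRange_one_succ_right hM, List.flatMap_append]
  simp

lemma pv_JV_succ (g : Int → Int → Int) (n M : Int) (hM : 0 ≤ M) :
    pvJV g n (M + 1) = pvJV g n M ++ pvFm2 g n M := by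
  unfold pvJV
  rw [PySem.List.pyRange_one_succ_right hM, List.flatMap_append]
  simp

lemma pv_IL_succ (g : Int → Int → Int) (n M : Int) (hM : 0 ≤ M) :
    pvIL g n (M + 1) = pvIL g n M ++ [((pvJL g n M).length : Int)] := by
  unfold pvIL
  rw [PySem.List.pyRange_one_succ_right hM, List.map_append]
  simp

-- the outer loop of port A, evaluated in closed form
lemma pv_outerA (jl ai : List Int) (n : Int) (M : Nat) :
    (PySem.List.pyRange 0 (M : Int)).foldl
      (fun (st : Int × List Int × List Int × List Int) i =>
        let at_ := PySem.List.slice ai (some (PySem.List.pyGetD jl i 0)) (some (PySem.List.pyGetD jl (i + 1) 0))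
        let st2 :=
          (PySem.List.pyRange i n).foldl (fun (st : Int × List Int × List Int) k =>
            let colk := PySem.List.slice ai (some (PySem.List.pyGetD jl k 0)) (some (PySem.List.pyGetD jl (k + 1) 0))
            let c := at_.foldl (fun c q => if colk.count q ≠ 0 then c + 1 else c) st.1
            if c ≠ 0 then (0, st.2.1 ++ [k], st.2.2 ++ [c]) else (c, st.2.1, st.2.2))
            (st.1, st.2.1, st.2.2.2)
        (st2.1, st2.2.1, st.2.2.1 ++ [((st2.2.1).length : Int)], st2.2.2))
      ((0 : Int), ([] : List Int), [(0 : Int)], ([] : List Int))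
    = (0, pvJL (pvCnt jl ai) n (M : Int), pvIL (pvCnt jl ai) n ((M : Int) + 1), pvJV (pvCnt jl ai) n (M : Int)) := by
  induction M with
  | zero =>
    have h1 : PySem.List.pyRange (0 : Int) 1 = [0] := by
      simpa using PySem.List.pyRange_one_singleton (0 : Int)
    simp [PySem.List.pyRange_one_eq_nil, pvJL, pvJV, pvIL, h1]
  | succ M ih =>
    have hM : (0 : Int) ≤ (M : Int) := by positivity
    have hcast : ((M + 1 : Nat) : Int) = (M : Int) + 1 := by push_cast; ring
    rw [hcast, PySem.List.pyRange_one_succ_right hM, List.foldl_append, ih]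
    simp only [List.foldl_cons, List.foldl_nil]
    have hinner : (fun (st : Int × List Int × List Int) k =>
        let colk := PySem.List.slice ai (some (PySem.List.pyGetD jl k 0)) (some (PySem.List.pyGetD jl (k + 1) 0))
        let c := (PySem.List.slice ai (some (PySem.List.pyGetD jl (M : Int) 0)) (some (PySem.List.pyGetD jl ((M : Int) + 1) 0))).foldl
            (fun c q => if colk.count q ≠ 0 then c + 1 else c) st.1
        if c ≠ 0 then ((0 : Int), st.2.1 ++ [k], st.2.2 ++ [c]) else (c, st.2.1, st.2.2))
        = (fun (st : Int × List Int × List Int) k =>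
        let c := st.1 + pvCnt jl ai (M : Int) k
        if c ≠ 0 then ((0 : Int), st.2.1 ++ [k], st.2.2 ++ [c]) else (c, st.2.1, st.2.2)) := by
      funext st k
      simp only [pv_countfold, pvCnt, pvCol]
      rfl
    rw [hinner, pv_Ainner]
    rw [pv_JL_succ _ n _ hM, pv_JV_succ _ n _ hM, pv_IL_succ _ n ((M : Int) + 1) (by positivity)]
    simp [pvFm1, pvFm2]
    rw [pv_JL_succ _ n _ hM, List.length_append]
    simp [pvFm1]

lemma pv_portA_eq (aj ai : List Int) :
    calc_ATA aj ai
      = ((pvIL (pvCnt (aj ++ [0]) ai) ((aj.length : Nat) : Int) (((aj.length : Nat) : Int) + 1)).dropLast,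
         pvJL (pvCnt (aj ++ [0]) ai) ((aj.length : Nat) : Int) ((aj.length : Nat) : Int),
         pvJV (pvCnt (aj ++ [0]) ai) ((aj.length : Nat) : Int) ((aj.length : Nat) : Int)) := by
  simp only [calc_ATA]
  rw [show (((aj ++ [(0 : Int)]).length : Int) - 1) = ((aj.length : Nat) : Int) by simp]
  rw [pv_outerA (aj ++ [0]) ai ((aj.length : Nat) : Int) aj.length]

-- ---- B side: transpose characterisation ----

-- folding over a flattened list is the nested fold
lemma pv_foldl_flatMap {α β σ : Type} (l : List α) (g : α → List β) (f : σ → β → σ) (s : σ) :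
    (l.flatMap g).foldl f s = l.foldl (fun a x => (g x).foldl f a) s := by
  induction l generalizing s with
  | nil => rfl
  | cons a t ih => simp [List.flatMap_cons, List.foldl_append, ih]

-- the transpose double loop of port B equals the stream fold pvBy
lemma pv_transpose_eq (jl ai : List Int) (C : Int) :
    (PySem.List.pyRange 0 C).foldl (fun bv i =>
        (PySem.List.slice ai (some (PySem.List.pyGetD jl i 0)) (some (PySem.List.pyGetD jl (i + 1) 0))).foldl
          (fun bv q => bv.modify q PySem.Dict.empty (fun cols => cols.insert i (cols.getD i 0 + 1))) bv)
        (PySem.Dict.empty : PySem.Dict Int (PySem.Dict Int Int))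
      = pvBy jl ai C := by
  unfold pvBy pvStream
  rw [pv_foldl_flatMap]
  congr 1
  funext bv i
  rw [List.foldl_map]
  rfl

-- value of the inner dict after the stream fold: multiplicity = occurrence count
lemma pv_by_getD :
    ∀ (L : List (Int × Int)) (d : PySem.Dict Int (PySem.Dict Int Int)) (q i : Int),
      ((L.foldl pvTStep d).getD q PySem.Dict.empty).getD i 0
        = ((d.getD q PySem.Dict.empty).getD i 0) + (L.count (i, q) : Int) := by
  intro L
  induction L with
  | nil => intro d q i; simp
  | cons p t ih =>
    intro d q i
    rw [List.foldl_cons, ih, List.count_cons]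
    have hstep : ((pvTStep d p).getD q PySem.Dict.empty).getD i 0
        = (d.getD q PySem.Dict.empty).getD i 0 + (if ((i, q) : Int × Int) = p then 1 else 0) := by
      unfold pvTStep
      rw [PySem.Dict.getD_modify]
      by_cases hq : q = p.2
      · rw [if_pos hq, PySem.Dict.getD_insert]
        by_cases hi : i = p.1
        · simp [hi, hq, Prod.ext_iff]
        · simp [hi, hq, Prod.ext_iff]
      · rw [if_neg hq]
        have hne : ((i, q) : Int × Int) ≠ p := fun h => hq (congrArg Prod.snd h)
        simp [hne]
    rw [hstep]
    push_cast
    by_cases h : ((i, q) : Int × Int) = p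
    · simp [h]; ring
    · simp [h]; exact fun hh => h hh.symm

-- membership in the inner dict after the stream fold
lemma pv_by_mem :
    ∀ (L : List (Int × Int)) (d : PySem.Dict Int (PySem.Dict Int Int)) (q i : Int),
      i ∈ ((L.foldl pvTStep d).getD q PySem.Dict.empty).keys
        ↔ i ∈ (d.getD q PySem.Dict.empty).keys ∨ (i, q) ∈ L := by
  intro L
  induction L with
  | nil => intro d q i; simp
  | cons p t ih =>
    intro d q i
    rw [List.foldl_cons, ih]
    have hstep : i ∈ ((pvTStep d p).getD q PySem.Dict.empty).keys
        ↔ i ∈ (d.getD q PySem.Dict.empty).keys ∨ ((i, q) : Int × Int) = p := by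
      unfold pvTStep
      rw [PySem.Dict.getD_modify]
      by_cases hq : q = p.2
      · rw [if_pos hq]
        rw [PySem.Dict.mem_keys_insert]
        subst hq
        constructor
        · rintro (h | h)
          · subst h; right; exact Prod.ext rfl rfl
          · left; exact h
        · rintro (h | h)
          · right; exact h
          · left; exact congrArg Prod.fst h
      · rw [if_neg hq]
        constructor
        · exact fun h => Or.inl h
        · rintro (h | h)
          · exact h
          · exact absurd (congrArg Prod.snd h).symm (fun he => hq he.symm)
    rw [hstep, List.mem_cons]
    tauto

-- the inner dicts keep distinct keys
lemma pv_by_nodup :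
    ∀ (L : List (Int × Int)) (d : PySem.Dict Int (PySem.Dict Int Int)),
      (∀ q, ((d.getD q PySem.Dict.empty : PySem.Dict Int Int)).keys.Nodup) →
      ∀ q, ((L.foldl pvTStep d).getD q PySem.Dict.empty).keys.Nodup := by
  intro L
  induction L with
  | nil => intro d h q; exact h q
  | cons p t ih =>
    intro d h q
    rw [List.foldl_cons]
    apply ih
    intro q'
    unfold pvTStep
    rw [PySem.Dict.getD_modify]
    by_cases hq : q' = p.2
    · rw [if_pos hq]
      exact PySem.Dict.nodup_keys_insert _ _ _ (h p.2)
    · rw [if_neg hq]; exact h q'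

-- stream membership: an occurrence (i, q) is a value q in column i
lemma pv_stream_mem (jl ai : List Int) (C i q : Int) :
    (i, q) ∈ pvStream jl ai C ↔ i ∈ PySem.List.pyRange 0 C ∧ q ∈ pvCol jl ai i := by
  unfold pvStream
  simp only [List.mem_flatMap, List.mem_map, Prod.mk.injEq]
  constructor
  · rintro ⟨j, hj, q', hq', rfl, rfl⟩
    exact ⟨hj, hq'⟩
  · rintro ⟨hi, hq⟩
    exact ⟨i, hi, q, hq, rfl, rfl⟩

-- generic: counting one occurrence pair in a tagged flatten over distinct tags
lemma pv_count_tagged (g : Int → List Int) :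
    ∀ (l : List Int), l.Nodup → ∀ i q, i ∈ l →
      ((l.flatMap (fun j => (g j).map (fun q' => (j, q')))).count (i, q)) = (g i).count q := by
  intro l
  induction l with
  | nil => intro _ i q h; simp at h
  | cons j t ih =>
    intro hnd i q hi
    rw [List.flatMap_cons, List.count_append]
    rcases List.mem_cons.mp hi with rfl | hit
    · have hinj : Function.Injective (fun q' : Int => (i, q')) := by
        intro a b h; simpa using h
      have h1 : ((g i).map (fun q' => (i, q'))).count (i, q) = (g i).count q :=
        List.count_map_of_injective _ _ hinj _
      have h2 : ((t.flatMap (fun j => (g j).map (fun q' => (j, q')))).count (i, q)) = 0 := by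
        apply List.count_eq_zero.mpr
        intro hmem
        rcases List.mem_flatMap.mp hmem with ⟨j', hj', hmem'⟩
        rcases List.mem_map.mp hmem' with ⟨q', _, heq⟩
        have : j' = i := (Prod.mk.injEq _ _ _ _).mp heq.symm |>.1.symm
        exact (List.nodup_cons.mp hnd).1 (this ▸ hj')
      omega
    · have hji : j ≠ i := fun h => (List.nodup_cons.mp hnd).1 (h ▸ hit)
      have h1 : ((g j).map (fun q' => (j, q'))).count (i, q) = 0 := by
        apply List.count_eq_zero.mpr
        intro hmem
        rcases List.mem_map.mp hmem with ⟨q', _, heq⟩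
        exact hji ((Prod.mk.injEq _ _ _ _).mp heq).1
      rw [h1, ih (List.nodup_cons.mp hnd).2 i q hit]
      omega

-- pyRange 0 n has distinct elements
lemma pv_nodup_pyRange (n : Nat) : (PySem.List.pyRange 0 (n : Int)).Nodup := by
  induction n with
  | zero => simp [PySem.List.pyRange_one_eq_nil]
  | succ n ih =>
    have h : ((n + 1 : Nat) : Int) = (n : Int) + 1 := by push_cast; ring
    rw [h, PySem.List.pyRange_one_succ_right (by positivity)]
    apply List.Nodup.append ih (List.nodup_singleton _)
    intro x hx
    have := (PySem.List.mem_pyRange_one.mp hx).2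
    simp only [List.mem_singleton]
    omega

-- stream count: occurrences of (i, q) = multiplicity of q in column i
lemma pv_stream_count (jl ai : List Int) (n : Nat) (i q : Int)
    (hi : i ∈ PySem.List.pyRange 0 (n : Int)) :
    (pvStream jl ai (n : Int)).count (i, q) = (pvCol jl ai i).count q := by
  unfold pvStream
  exact pv_count_tagged (pvCol jl ai) _ (pv_nodup_pyRange n) i q hi

-- generic: the lookup of a fold whose every step adds a known amount
lemma pv_fold_add {α : Type} (step : PySem.Dict (Int × Int) Int → α → PySem.Dict (Int × Int) Int)
    (g : α → (Int × Int) → Int)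
    (h : ∀ M a key, (step M a).getD key 0 = M.getD key 0 + g a key) :
    ∀ (l : List α) (M : PySem.Dict (Int × Int) Int) (key : Int × Int),
      (l.foldl step M).getD key 0 = M.getD key 0 + (l.map (fun a => g a key)).sum := by
  intro l
  induction l with
  | nil => intro M key; simp
  | cons a t ih =>
    intro M key
    rw [List.foldl_cons, ih, h]
    simp
    ring

-- one conditional scatter insert
lemma pv_scatter_step (im : Int × Int) (M : PySem.Dict (Int × Int) Int) (k : Int) (key : Int × Int) :
    ((if im.1 ≤ k then M.insert (im.1, k) (M.getD (im.1, k) 0 + im.2) else M)).getD key 0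
      = M.getD key 0 + (if im.1 ≤ k ∧ ((im.1, k) : Int × Int) = key then im.2 else 0) := by
  by_cases hc : im.1 ≤ k
  · rw [if_pos hc, PySem.Dict.getD_insert]
    by_cases he : key = (im.1, k)
    · simp [he, hc]
    · have hne : ¬(im.1 ≤ k ∧ ((im.1, k) : Int × Int) = key) := fun hh => he hh.2.symm
      rw [if_neg (fun h : key = (im.1, k) => he h), if_neg hne]
      simp
  · simp [hc]

-- the scatter phase in closed form: a triple sum of indicators
lemma pv_scatter_getD (B : PySem.Dict Int (PySem.Dict Int Int)) (key : Int × Int) :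
    (B.values.foldl (fun M cols =>
        cols.items.foldl (fun M im =>
          cols.keys.foldl (fun M k =>
            if im.1 ≤ k then M.insert (im.1, k) (M.getD (im.1, k) 0 + im.2) else M) M) M)
      (PySem.Dict.empty : PySem.Dict (Int × Int) Int)).getD key 0
    = (B.values.map (fun cols =>
        (cols.items.map (fun im =>
          ((cols.keys.map (fun k => if im.1 ≤ k ∧ ((im.1, k) : Int × Int) = key then im.2 else 0)).sum))).sum)).sum := by
  rw [pv_fold_add _ (fun cols key =>
      (cols.items.map (fun im =>
        ((cols.keys.map (fun k => if im.1 ≤ k ∧ ((im.1, k) : Int × Int) = key then im.2 else 0)).sum))).sum)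
      (fun M cols key => by
        rw [pv_fold_add _ (fun im key =>
            (cols.keys.map (fun k => if im.1 ≤ k ∧ ((im.1, k) : Int × Int) = key then im.2 else 0)).sum)
            (fun M im key => by
              rw [pv_fold_add _ (fun k key => if im.1 ≤ k ∧ ((im.1, k) : Int × Int) = key then im.2 else 0)
                  (fun M k key => pv_scatter_step im M k key)]) ])]
  simp

-- sum of a keyed indicator over a list without duplicates
lemma pv_sum_single (v : Int → Int) (k₀ : Int) :
    ∀ (s : List Int), s.Nodup →
      ((s.map (fun k => if k = k₀ then v k else 0)).sum) = if k₀ ∈ s then v k₀ else 0 := by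
  intro s
  induction s with
  | nil => simp
  | cons a t ih =>
    intro hnd
    rw [List.map_cons, List.sum_cons, ih (List.nodup_cons.mp hnd).2]
    by_cases ha : a = k₀
    · have hnt : k₀ ∉ t := ha ▸ (List.nodup_cons.mp hnd).1
      simp [ha, hnt]
    · simp [ha, Ne.symm ha]

-- sums over two duplicate-free index lists agree when the summand vanishes off both
lemma pv_sum_nodup_congr (f : Int → Int) (s t : List Int) (hs : s.Nodup) (ht : t.Nodup)
    (h : ∀ x, f x ≠ 0 → (x ∈ s ↔ x ∈ t)) : (s.map f).sum = (t.map f).sum := by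
  rw [← List.sum_toFinset f hs, ← List.sum_toFinset f ht]
  rw [← Finset.sum_filter_ne_zero s.toFinset, ← Finset.sum_filter_ne_zero t.toFinset]
  congr 1
  ext x
  simp only [Finset.mem_filter, List.mem_toFinset]
  constructor
  · rintro ⟨hx, hf⟩; exact ⟨(h x hf).mp hx, hf⟩
  · rintro ⟨hx, hf⟩; exact ⟨(h x hf).mpr hx, hf⟩

-- the transpose fold, specialised to its empty start
lemma pv_by_mem' (jl ai : List Int) (C q i : Int) :
    i ∈ ((pvBy jl ai C).getD q PySem.Dict.empty).keys ↔ (i, q) ∈ pvStream jl ai C := by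
  unfold pvBy
  rw [pv_by_mem]
  simp

lemma pv_by_getD' (jl ai : List Int) (C q i : Int) :
    ((pvBy jl ai C).getD q PySem.Dict.empty).getD i 0 = ((pvStream jl ai C).count (i, q) : Int) := by
  unfold pvBy
  rw [pv_by_getD]
  simp

lemma pv_by_nodup' (jl ai : List Int) (C : Int) :
    ∀ q, ((pvBy jl ai C).getD q PySem.Dict.empty).keys.Nodup := by
  unfold pvBy
  apply pv_by_nodup
  intro q
  simp

lemma pv_by_keys_nodup (jl ai : List Int) (C : Int) : (pvBy jl ai C).keys.Nodup := by
  unfold pvBy pvTStep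
  exact PySem.Dict.nodup_keys_foldl_modify_key _ _ _ _ _ PySem.Dict.nodup_keys_empty

-- the per-value term of the scatter sum at key (i₀, k₀)
lemma pv_Fq (jl ai : List Int) (n : Nat) (i₀ k₀ : Int)
    (h0 : 0 ≤ i₀) (hik : i₀ ≤ k₀) (hk : k₀ < (n : Int)) (q : Int) :
    ((((pvBy jl ai (n : Int)).getD q PySem.Dict.empty).items.map (fun im =>
        ((((pvBy jl ai (n : Int)).getD q PySem.Dict.empty).keys.map
          (fun k => if im.1 ≤ k ∧ ((im.1, k) : Int × Int) = (i₀, k₀) then im.2 else 0)).sum))).sum)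
      = if q ∈ pvCol jl ai i₀ ∧ q ∈ pvCol jl ai k₀ then ((pvCol jl ai i₀).count q : Int) else 0 := by
  have hi₀mem : i₀ ∈ PySem.List.pyRange 0 (n : Int) := PySem.List.mem_pyRange_one.mpr ⟨h0, by omega⟩
  have hk₀mem : k₀ ∈ PySem.List.pyRange 0 (n : Int) := PySem.List.mem_pyRange_one.mpr ⟨by omega, hk⟩
  have hnd := pv_by_nodup' jl ai (n : Int) q
  have hin : ∀ im : Int × Int,
      ((((pvBy jl ai (n : Int)).getD q PySem.Dict.empty).keys.map
          (fun k => if im.1 ≤ k ∧ ((im.1, k) : Int × Int) = (i₀, k₀) then im.2 else 0)).sum)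
        = if k₀ ∈ ((pvBy jl ai (n : Int)).getD q PySem.Dict.empty).keys then
            (if im.1 = i₀ ∧ im.1 ≤ k₀ then im.2 else 0) else 0 := by
    intro im
    have hfn : (fun k => if im.1 ≤ k ∧ ((im.1, k) : Int × Int) = (i₀, k₀) then im.2 else 0)
        = (fun k => if k = k₀ then (if im.1 = i₀ ∧ im.1 ≤ k then im.2 else 0) else 0) := by
      funext k
      by_cases h1 : k = k₀ <;> by_cases h2 : im.1 = i₀ <;> by_cases h3 : im.1 ≤ k <;>
        simp [h1, h2, h3]
    rw [hfn, pv_sum_single (fun k => if im.1 = i₀ ∧ im.1 ≤ k then im.2 else 0) k₀ _ hnd]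
  rw [PySem.Dict.items_eq_map_keys _ hnd 0, List.map_map]
  simp only [Function.comp_def]
  have hmid : ∀ i : Int,
      (if k₀ ∈ ((pvBy jl ai (n : Int)).getD q PySem.Dict.empty).keys then
        (if ((i, ((pvBy jl ai (n : Int)).getD q PySem.Dict.empty).getD i 0) : Int × Int).1 = i₀ ∧
            ((i, ((pvBy jl ai (n : Int)).getD q PySem.Dict.empty).getD i 0) : Int × Int).1 ≤ k₀ then
          ((i, ((pvBy jl ai (n : Int)).getD q PySem.Dict.empty).getD i 0) : Int × Int).2 else 0) else 0)
      = if i = i₀ then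
          (if k₀ ∈ ((pvBy jl ai (n : Int)).getD q PySem.Dict.empty).keys ∧ i ≤ k₀ then
            ((pvBy jl ai (n : Int)).getD q PySem.Dict.empty).getD i 0 else 0) else 0 := by
    intro i
    by_cases h1 : i = i₀ <;> by_cases h2 : k₀ ∈ ((pvBy jl ai (n : Int)).getD q PySem.Dict.empty).keys <;>
      by_cases h3 : i ≤ k₀ <;> simp [h1, h2, h3]
  rw [List.map_congr_left (fun i _ => (hin (i, ((pvBy jl ai (n : Int)).getD q PySem.Dict.empty).getD i 0)).trans (hmid i))]
  rw [pv_sum_single (fun i => if k₀ ∈ ((pvBy jl ai (n : Int)).getD q PySem.Dict.empty).keys ∧ i ≤ k₀ then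
        ((pvBy jl ai (n : Int)).getD q PySem.Dict.empty).getD i 0 else 0) i₀ _ hnd]
  have hmi : i₀ ∈ ((pvBy jl ai (n : Int)).getD q PySem.Dict.empty).keys ↔ q ∈ pvCol jl ai i₀ := by
    rw [pv_by_mem', pv_stream_mem]
    simp [hi₀mem]
  have hmk : k₀ ∈ ((pvBy jl ai (n : Int)).getD q PySem.Dict.empty).keys ↔ q ∈ pvCol jl ai k₀ := by
    rw [pv_by_mem', pv_stream_mem]
    simp [hk₀mem]
  have hcnt : ((pvBy jl ai (n : Int)).getD q PySem.Dict.empty).getD i₀ 0 = ((pvCol jl ai i₀).count q : Int) := by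
    rw [pv_by_getD', pv_stream_count jl ai n i₀ q hi₀mem]
  by_cases m1 : q ∈ pvCol jl ai i₀ <;> by_cases m2 : q ∈ pvCol jl ai k₀ <;>
    simp [hmi, hmk, m1, m2, hik, hcnt]

-- the scattered dict holds exactly A's per-pair count
lemma pv_M_getD (jl ai : List Int) (n : Nat) (i₀ k₀ : Int)
    (h0 : 0 ≤ i₀) (hik : i₀ ≤ k₀) (hk : k₀ < (n : Int)) :
    (pvM jl ai (n : Int)).getD (i₀, k₀) 0 = pvCnt jl ai i₀ k₀ := by
  have hi₀mem : i₀ ∈ PySem.List.pyRange 0 (n : Int) := PySem.List.mem_pyRange_one.mpr ⟨h0, by omega⟩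
  unfold pvM
  rw [pv_scatter_getD]
  rw [PySem.Dict.values_eq_map_keys _ (pv_by_keys_nodup jl ai (n : Int)) PySem.Dict.empty]
  rw [List.map_map]
  simp only [Function.comp_def]
  rw [List.map_congr_left (fun q _ => pv_Fq jl ai n i₀ k₀ h0 hik hk q)]
  have hqkeys : ∀ q', q' ∈ pvCol jl ai i₀ → q' ∈ (pvBy jl ai (n : Int)).keys := by
    intro q' hq'
    have hmem : i₀ ∈ ((pvBy jl ai (n : Int)).getD q' PySem.Dict.empty).keys :=
      (pv_by_mem' jl ai _ q' i₀).mpr ((pv_stream_mem jl ai _ i₀ q').mpr ⟨hi₀mem, hq'⟩)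
    by_contra hnk
    have hnone : (pvBy jl ai (n : Int)).get? q' = none :=
      (PySem.Dict.get?_eq_none_iff_not_mem_keys _ _).mpr hnk
    rw [PySem.Dict.getD_eq_get?_getD, hnone] at hmem
    simp at hmem
  rw [pv_sum_nodup_congr _ _ (PySem.Set.ofList (pvCol jl ai i₀)) (pv_by_keys_nodup jl ai (n : Int))
    (PySem.Set.nodup_ofList _) ?hcong]
  case hcong =>
    intro x hfx
    have hxcol : x ∈ pvCol jl ai i₀ := by
      by_contra hxc
      exact hfx (by simp [hxc])
    exact ⟨fun _ => (PySem.Set.mem_ofList _ _).mpr hxcol, fun _ => hqkeys x hxcol⟩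
  rw [List.map_congr_left (fun x hx => by
    have hx' : x ∈ pvCol jl ai i₀ := (PySem.Set.mem_ofList _ _).mp hx
    show (if x ∈ pvCol jl ai i₀ ∧ x ∈ pvCol jl ai k₀ then ((pvCol jl ai i₀).count x : Int) else 0)
        = if (fun y => decide (y ∈ pvCol jl ai k₀)) x then ((pvCol jl ai i₀).count x : Int) else 0
    by_cases h2 : x ∈ pvCol jl ai k₀ <;> simp [hx', h2])]
  rw [pv_sumDedup]
  rfl

-- the outer emission loop of port B, evaluated in closed form
lemma pv_outerB (jl ai : List Int) (n : Nat) (M : Nat) (hMC : M ≤ n) :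
    (PySem.List.pyRange 0 (M : Int)).foldl
      (fun (st : List Int × List Int × List Int) i =>
        let b_iloc := st.1 ++ [((st.2.1).length : Int)]
        let st2 :=
          (PySem.List.pyRange i (n : Int)).foldl (fun (st : List Int × List Int) k =>
            let v := (pvM jl ai (n : Int)).getD (i, k) 0
            if v ≠ 0 then (st.1 ++ [k], st.2 ++ [v]) else st)
            (st.2.1, st.2.2)
        (b_iloc, st2.1, st2.2))
      (([], [], []) : List Int × List Int × List Int)
    = (pvIL (pvCnt jl ai) (n : Int) (M : Int), pvJL (pvCnt jl ai) (n : Int) (M : Int), pvJV (pvCnt jl ai) (n : Int) (M : Int)) := by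
  induction M with
  | zero =>
    simp [PySem.List.pyRange_one_eq_nil, pvJL, pvJV, pvIL]
  | succ M ih =>
    have hM : (0 : Int) ≤ (M : Int) := by positivity
    have hMC' : M ≤ n := by omega
    have hcast : ((M + 1 : Nat) : Int) = (M : Int) + 1 := by push_cast; ring
    rw [hcast, PySem.List.pyRange_one_succ_right hM, List.foldl_append, ih hMC']
    simp only [List.foldl_cons, List.foldl_nil]
    have hinner : (PySem.List.pyRange (M : Int) (n : Int)).foldl (fun (st : List Int × List Int) k =>
            let v := (pvM jl ai (n : Int)).getD ((M : Int), k) 0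
            if v ≠ 0 then (st.1 ++ [k], st.2 ++ [v]) else st)
          (pvJL (pvCnt jl ai) (n : Int) (M : Int), pvJV (pvCnt jl ai) (n : Int) (M : Int))
        = (pvJL (pvCnt jl ai) (n : Int) (M : Int) ++ pvFm1 (pvCnt jl ai) (n : Int) (M : Int),
           pvJV (pvCnt jl ai) (n : Int) (M : Int) ++ pvFm2 (pvCnt jl ai) (n : Int) (M : Int)) := by
      rw [PySem.List.foldl_congr_mem _ _
        (fun (st : List Int × List Int) k =>
          if pvCnt jl ai (M : Int) k ≠ 0 then (st.1 ++ [k], st.2 ++ [pvCnt jl ai (M : Int) k]) else st) _ ?conv]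
      · rw [pv_emitfold]
        simp [pvFm1, pvFm2]
      case conv =>
        intro acc k hk
        have hkm := (PySem.List.mem_pyRange_one).mp hk
        rw [pv_M_getD jl ai n (M : Int) k hM (hkm.1) (hkm.2)]
    rw [hinner]
    rw [pv_JL_succ _ _ _ hM, pv_JV_succ _ _ _ hM, pv_IL_succ _ _ _ hM]

lemma pv_portB_eq (aj ai : List Int) :
    calc_ATA_alt aj ai
      = (pvIL (pvCnt (aj ++ [0]) ai) ((aj.length : Nat) : Int) ((aj.length : Nat) : Int),
         pvJL (pvCnt (aj ++ [0]) ai) ((aj.length : Nat) : Int) ((aj.length : Nat) : Int),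
         pvJV (pvCnt (aj ++ [0]) ai) ((aj.length : Nat) : Int) ((aj.length : Nat) : Int)) := by
  simp only [calc_ATA_alt]
  rw [show (((aj ++ [(0 : Int)]).length : Int) - 1) = ((aj.length : Nat) : Int) by simp]
  rw [pv_transpose_eq (aj ++ [0]) ai ((aj.length : Nat) : Int)]
  rw [show ((pvBy (aj ++ [0]) ai ((aj.length : Nat) : Int)).values.foldl (fun M cols =>
      cols.items.foldl (fun M im =>
        cols.keys.foldl (fun M k =>
          if im.1 ≤ k then M.insert (im.1, k) (M.getD (im.1, k) 0 + im.2) else M) M) M)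
      (PySem.Dict.empty : PySem.Dict (Int × Int) Int)) = pvM (aj ++ [0]) ai ((aj.length : Nat) : Int) from rfl]
  exact pv_outerB (aj ++ [0]) ai aj.length aj.length le_rfl

-- ===== VERDICT (by name: the statement is the Claim_ definition above) =====
theorem calc_ATA_spec : Claim_equal_calc_ATA := by
  intro aj ai _
  unfold Spec_calc_ATA
  rw [pv_portA_eq, pv_portB_eq]
  rw [pv_IL_succ _ _ _ (by positivity), List.dropLast_concat]
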